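-- pv_equiv track=rewrite | github.com/Nazzcodek/challenge | first.py | fifth_unlock
-- ===== SOURCE A (Python) =====
-- def fifth_unlock(range_start, range_end):
--     code = 0
--     for digit1 in range(range_start,range_end):
--         for digit2 in range(range_start,range_end):
--             for digit3 in range(range_start,range_end):
--                 if digit1 == digit2 or digit1 == digit3 or digit2 == digit3:
--                     code += 1
--     return code
-- ===== SOURCE B (Python) =====
-- def fifth_unlock(range_start, range_end):
--     n = range_end - range_start
--     if n < 0:
--         n = 0
--     return n ** 3 - n * (n - 1) * (n - 2)
-- ===== Notes on version B (the rewrite author's own statement) =====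
-- stated objective: simpler
-- what changed: Replaces the triple nested counting loop over range(range_start, range_end) by the closed form n^3 - n(n-1)(n-2) with n = max(range_end - range_start, 0).
import Mathlib
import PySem

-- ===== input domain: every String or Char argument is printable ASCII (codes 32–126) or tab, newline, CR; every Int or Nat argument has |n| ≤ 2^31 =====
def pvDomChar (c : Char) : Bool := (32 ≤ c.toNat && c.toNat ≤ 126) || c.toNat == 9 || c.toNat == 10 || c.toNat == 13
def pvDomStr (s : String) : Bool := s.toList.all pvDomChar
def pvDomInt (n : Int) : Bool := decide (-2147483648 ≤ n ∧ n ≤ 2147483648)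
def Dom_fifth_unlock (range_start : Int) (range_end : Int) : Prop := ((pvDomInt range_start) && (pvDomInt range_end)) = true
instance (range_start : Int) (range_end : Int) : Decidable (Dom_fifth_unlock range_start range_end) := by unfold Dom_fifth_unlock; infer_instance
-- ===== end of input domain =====

-- B replaces A's triple nested counting loop by the closed form n^3 - n(n-1)(n-2), n = max(range_end - range_start, 0) (objective: simpler).


-- ===== PORT A =====
def fifth_unlock (range_start : Int) (range_end : Int) : Int :=
  (PySem.List.pyRange range_start range_end 1).foldl (fun code digit1 =>
    (PySem.List.pyRange range_start range_end 1).foldl (fun code digit2 =>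
      (PySem.List.pyRange range_start range_end 1).foldl (fun code digit3 =>
        if digit1 = digit2 ∨ digit1 = digit3 ∨ digit2 = digit3 then code + 1 else code)
        code)
      code)
    0

-- ===== PORT B =====
def fifth_unlock_alt (range_start : Int) (range_end : Int) : Int :=
  let n0 : Int := range_end - range_start
  let n : Int := if n0 < 0 then 0 else n0
  n ^ 3 - n * (n - 1) * (n - 2)

-- ===== PRECONDITION & SPEC =====
def Spec_fifth_unlock (range_start : Int) (range_end : Int) (out : Int) : Prop := out = fifth_unlock_alt range_start range_end
instance (range_start : Int) (range_end : Int) (out : Int) : Decidable (Spec_fifth_unlock range_start range_end out) := by unfold Spec_fifth_unlock; infer_instance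

-- ===== CLAIM (what is proved, stated in full; the proofs are below) =====
def Claim_equal_fifth_unlock : Prop := ∀ (range_start : Int) (range_end : Int), Dom_fifth_unlock range_start range_end → Spec_fifth_unlock range_start range_end (fifth_unlock range_start range_end)

-- ===== LEMMAS AND PROOFS =====

-- a counting foldl is the initial value plus a countP
theorem pv_foldl_count (p : Int → Prop) [DecidablePred p] (l : List Int) (c : Int) :
    l.foldl (fun acc x => if p x then acc + 1 else acc) c
      = c + (l.countP (fun x => decide (p x)) : Int) := by
  induction l generalizing c with
  | nil => simp
  | cons a l ih =>
    simp only [List.foldl_cons, List.countP_cons, ih]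
    by_cases h : p a
    · simp [h]
      ring
    · simp [h]

-- an accumulating foldl is the initial value plus a sum
theorem pv_foldl_add (f : Int → Int) (l : List Int) (c : Int) :
    l.foldl (fun acc x => acc + f x) c = c + (l.map f).sum := by
  induction l generalizing c with
  | nil => simp
  | cons a l ih => simp [ih]; ring

theorem pv_sum_map_const (l : List Int) (c : Int) :
    (l.map (fun _ => c)).sum = (l.length : Int) * c := by
  induction l with
  | nil => simp
  | cons a l ih => simp; ring

-- sum of a map that is v everywhere except at the single occurrence of a, where it is u
theorem pv_sum_if_single (l : List Int) (hl : l.Nodup) (a : Int) (ha : a ∈ l) (u v : Int) :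
    (l.map (fun x => if a = x then u else v)).sum = u + v * ((l.length : Int) - 1) := by
  induction l with
  | nil => cases ha
  | cons b l ih =>
    rcases List.nodup_cons.mp hl with ⟨hb, hl'⟩
    rcases List.mem_cons.mp ha with h | h
    · subst h
      have : ∀ x ∈ l, (if a = x then u else v) = v := by
        intro x hx
        have : a ≠ x := fun he => hb (he ▸ hx)
        simp [this]
      simp only [List.map_cons, List.sum_cons]
      rw [List.map_congr_left this, pv_sum_map_const]
      push_cast [List.length_cons]
      ring
    · have hab : a ≠ b := fun he => hb (he ▸ h)
      simp only [List.map_cons, List.sum_cons, if_neg hab, ih hl' h]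
      push_cast [List.length_cons]
      ring

-- a nodup list containing a has exactly one element equal to a
theorem pv_countP_single (l : List Int) (hl : l.Nodup) (a : Int) (ha : a ∈ l) :
    l.countP (fun x => decide (a = x)) = 1 := by
  have h := List.count_eq_one_of_mem hl ha
  rw [show (fun x => decide (a = x)) = (fun x => x == a) by
    funext x
    by_cases hx : a = x
    · subst hx; simp
    · have hx' : x ≠ a := fun he => hx he.symm
      simp [hx, hx']]
  simpa [List.count] using h

-- the count of d3 ∈ range with d1=d2 ∨ d1=d3 ∨ d2=d3, for d1, d2 in the range
theorem pv_inner_count (s e d1 d2 : Int) (h1 : d1 ∈ PySem.List.pyRange s e 1)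
    (h2 : d2 ∈ PySem.List.pyRange s e 1) :
    ((PySem.List.pyRange s e 1).countP
        (fun d3 => decide (d1 = d2 ∨ d1 = d3 ∨ d2 = d3)) : Int)
      = if d1 = d2 then ((e - s).toNat : Int) else 2 := by
  by_cases hd : d1 = d2
  · rw [if_pos hd]
    have : (PySem.List.pyRange s e 1).countP
        (fun d3 => decide (d1 = d2 ∨ d1 = d3 ∨ d2 = d3))
        = (PySem.List.pyRange s e 1).length :=
      List.countP_eq_length.mpr (by intro x _; simp [hd])
    rw [this, PySem.List.length_pyRange_one]
  · rw [if_neg hd]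
    have hnd := PySem.List.nodup_pyRange_one s e
    have hq : (PySem.List.pyRange s e 1).countP
        (fun d3 => decide (d1 = d2 ∨ d1 = d3 ∨ d2 = d3))
        = (PySem.List.pyRange s e 1).countP (fun d3 => decide (d1 = d3 ∨ d2 = d3)) := by
      apply List.countP_congr
      intro x _
      simp [hd]
    rw [hq]
    -- count of elements equal to d1 or d2 in a nodup list containing both, d1 ≠ d2
    have : ∀ (l : List Int), l.Nodup → d1 ∈ l → d2 ∈ l →
        l.countP (fun d3 => decide (d1 = d3 ∨ d2 = d3)) = 2 := by
      intro l
      induction l with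
      | nil => intro _ h _; cases h
      | cons b l ih =>
        intro hnd hm1 hm2
        rcases List.nodup_cons.mp hnd with ⟨hb, hl'⟩
        rcases List.mem_cons.mp hm1 with e1 | e1
        · subst e1
          have hm2' : d2 ∈ l := by
            rcases List.mem_cons.mp hm2 with e2 | e2
            · exact absurd e2.symm hd
            · exact e2
          have : l.countP (fun d3 => decide (d1 = d3 ∨ d2 = d3))
              = l.countP (fun d3 => decide (d2 = d3)) := by
            apply List.countP_congr
            intro x hx
            have : d1 ≠ x := fun he => hb (he ▸ hx)
            simp [this]
          simp only [List.countP_cons, this]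
          rw [pv_countP_single l hl' d2 hm2']
          simp
        · rcases List.mem_cons.mp hm2 with e2 | e2
          · subst e2
            have : l.countP (fun d3 => decide (d1 = d3 ∨ d2 = d3))
                = l.countP (fun d3 => decide (d1 = d3)) := by
              apply List.countP_congr
              intro x hx
              have : d2 ≠ x := fun he => hb (he ▸ hx)
              simp [this]
            simp only [List.countP_cons, this]
            rw [pv_countP_single l hl' d1 e1]
            simp [hd]
          · have hb1 : d1 ≠ b := fun he => hb (he ▸ e1)
            have hb2 : d2 ≠ b := fun he => hb (he ▸ e2)
            simp only [List.countP_cons]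
            rw [ih hl' e1 e2]
            simp [hb1, hb2]
    rw [this _ hnd h1 h2]
    norm_num

-- closed form for A
theorem pv_fifth_unlock_closed (s e : Int) :
    fifth_unlock s e = ((e - s).toNat : Int) * (3 * ((e - s).toNat : Int) - 2) := by
  unfold fifth_unlock
  set R := PySem.List.pyRange s e 1 with hR
  set N : Int := ((e - s).toNat : Int) with hN
  have hlen : (R.length : Int) = N := by
    rw [hR, PySem.List.length_pyRange_one, hN]
  simp only [pv_foldl_count, pv_foldl_add, zero_add]
  have hout : ∀ d1 ∈ R, (R.map (fun d2 =>
      (R.countP (fun d3 => decide (d1 = d2 ∨ d1 = d3 ∨ d2 = d3)) : Int))).sum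
      = 3 * N - 2 := by
    intro d1 h1
    have hmap : ∀ d2 ∈ R, (R.countP (fun d3 => decide (d1 = d2 ∨ d1 = d3 ∨ d2 = d3)) : Int)
        = if d1 = d2 then N else 2 := by
      intro d2 h2
      exact pv_inner_count s e d1 d2 h1 h2
    rw [List.map_congr_left hmap]
    rw [pv_sum_if_single R (hR ▸ PySem.List.nodup_pyRange_one s e) d1 h1 N 2, hlen]
    have hNpos : (1 : Int) ≤ N := by
      have := List.length_pos_of_mem h1
      omega
    ring
  rw [List.map_congr_left hout, pv_sum_map_const, hlen]

-- ===== VERDICT (by name: the statement is the Claim_ definition above) =====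
theorem fifth_unlock_spec : Claim_equal_fifth_unlock := by
  intro s e _
  unfold Spec_fifth_unlock fifth_unlock_alt
  rw [pv_fifth_unlock_closed]
  by_cases h : e - s < 0
  · have : (e - s).toNat = 0 := Int.toNat_of_nonpos (le_of_lt h)
    simp [this, h]
  · have hge : 0 ≤ e - s := not_lt.mp h
    have : ((e - s).toNat : Int) = e - s := Int.toNat_of_nonneg hge
    simp only [this, if_neg h]
    ring
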